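-- pv_equiv track=rewrite | github.com/KLGR123/latex2word | latex2word/rendering/table.py | _split_cells
-- ===== SOURCE A (Python) =====
-- def _split_cells(row_text: str) -> list:
--     """
--     Split a row string by '&' while respecting nested braces.
--     Returns a list of raw cell strings.
--     """
--     cells = []
--     depth = 0
--     buf = ""
--     i = 0
--     while i < len(row_text):
--         c = row_text[i]
--         if c == "{":
--             depth += 1
--         elif c == "}":
--             depth -= 1
--         elif c == "&" and depth == 0:
--             cells.append(buf)
--             buf = ""
--             i += 1
--             continue
--         buf += c
--         i += 1
--     cells.append(buf)
--     return cells
-- ===== SOURCE B (Python) =====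
-- def _split_cells(row_text: str) -> list:
--     """
--     Split a row string by '&' while respecting nested braces.
--     Two passes: record top-level '&' indices, then slice between them.
--     """
--     cuts = []
--     depth = 0
--     for i, c in enumerate(row_text):
--         if c == "{":
--             depth += 1
--         elif c == "}":
--             depth -= 1
--         elif c == "&" and depth == 0:
--             cuts.append(i)
--     cells = []
--     start = 0
--     for c in cuts:
--         cells.append(row_text[start:c])
--         start = c + 1
--     cells.append(row_text[start:])
--     return cells
-- ===== Notes on version B (the rewrite author's own statement) =====
-- stated objective: alternative
-- what changed: Replaces A's single loop that grows a character buffer and emits it at each top-level '&' by a two-pass index-then-slice algorithm: first record the indices of top-level '&', then build the cells by slicing between consecutive boundaries.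
import Mathlib
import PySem

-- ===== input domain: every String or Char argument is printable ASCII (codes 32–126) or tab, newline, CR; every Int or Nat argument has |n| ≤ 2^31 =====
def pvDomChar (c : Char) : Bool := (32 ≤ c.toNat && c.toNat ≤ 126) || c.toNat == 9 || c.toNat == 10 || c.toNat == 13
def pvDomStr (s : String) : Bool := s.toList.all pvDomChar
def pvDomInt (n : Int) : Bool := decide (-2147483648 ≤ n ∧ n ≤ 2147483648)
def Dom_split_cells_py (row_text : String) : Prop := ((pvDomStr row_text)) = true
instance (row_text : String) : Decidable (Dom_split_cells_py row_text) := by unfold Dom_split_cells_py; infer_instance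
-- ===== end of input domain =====

-- B replaces A's buffer-accumulating single loop by a two-pass index-then-slice algorithm (same cost, different decomposition).


-- ===== PORT A =====
-- A's while-loop over characters: state = (cells, depth, buf); strings ported as List Char.
def splitCellsLoopA (chars : List Char) (cells : List (List Char)) (depth : Int) (buf : List Char) :
    List (List Char) :=
  match chars with
  | [] => cells ++ [buf]
  | c :: rest =>
    if c = '{' then splitCellsLoopA rest cells (depth + 1) (buf ++ [c])
    else if c = '}' then splitCellsLoopA rest cells (depth - 1) (buf ++ [c])
    else if c = '&' ∧ depth = 0 then splitCellsLoopA rest (cells ++ [buf]) depth []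
    else splitCellsLoopA rest cells depth (buf ++ [c])

def split_cells_py (row_text : String) : List String :=
  (splitCellsLoopA row_text.toList [] 0 []).map String.ofList

-- ===== PORT B =====
-- B pass 1: indices of top-level '&' (enumerate with counter i).
def cutIdxsB (chars : List Char) (depth : Int) (i : Nat) : List Nat :=
  match chars with
  | [] => []
  | c :: rest =>
    if c = '{' then cutIdxsB rest (depth + 1) (i + 1)
    else if c = '}' then cutIdxsB rest (depth - 1) (i + 1)
    else if c = '&' ∧ depth = 0 then i :: cutIdxsB rest depth (i + 1)
    else cutIdxsB rest depth (i + 1)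

-- B pass 2: row_text[start:c] for in-range 0 ≤ start ≤ c is exactly (drop start).take (c-start);
-- row_text[start:] is exactly drop start (Python slice on nonnegative in-range indices).
def buildSlicesB (full : List Char) (start : Nat) (cuts : List Nat) : List (List Char) :=
  match cuts with
  | [] => [full.drop start]
  | c :: cs => (full.drop start).take (c - start) :: buildSlicesB full (c + 1) cs

def split_cells_py_alt (row_text : String) : List String :=
  (buildSlicesB row_text.toList 0 (cutIdxsB row_text.toList 0 0)).map String.ofList

-- ===== PRECONDITION & SPEC =====
def Spec_split_cells_py (row_text : String) (out : List String) : Prop := out = split_cells_py_alt row_text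
instance (row_text : String) (out : List String) : Decidable (Spec_split_cells_py row_text out) := by unfold Spec_split_cells_py; infer_instance

-- ===== CLAIM (what is proved, stated in full; the proofs are below) =====
def Claim_equal_split_cells_py : Prop := ∀ (row_text : String), Dom_split_cells_py row_text → Spec_split_cells_py row_text (split_cells_py row_text)

-- ===== LEMMAS AND PROOFS =====

-- common recursive specification of the split (proof-only helper)
def mapHead (f : List Char → List Char) : List (List Char) → List (List Char)
  | [] => []
  | h :: t => f h :: t

def specSplit (chars : List Char) (depth : Int) : List (List Char) :=
  match chars with
  | [] => [[]]
  | c :: rest =>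
    if c = '{' then mapHead (c :: ·) (specSplit rest (depth + 1))
    else if c = '}' then mapHead (c :: ·) (specSplit rest (depth - 1))
    else if c = '&' ∧ depth = 0 then [] :: specSplit rest depth
    else mapHead (c :: ·) (specSplit rest depth)

theorem mapHead_mapHead (f g : List Char → List Char) (xs : List (List Char)) :
    mapHead f (mapHead g xs) = mapHead (fun l => f (g l)) xs := by
  cases xs <;> simp [mapHead]

-- A side: the loop equals cells ++ buf-prefixed spec
theorem loopA_eq_spec (chars : List Char) (cells : List (List Char)) (depth : Int) (buf : List Char) :
    splitCellsLoopA chars cells depth buf = cells ++ mapHead (buf ++ ·) (specSplit chars depth) := by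
  induction chars generalizing cells depth buf with
  | nil => simp [splitCellsLoopA, specSplit, mapHead]
  | cons c rest ih =>
    simp only [splitCellsLoopA, specSplit]
    split_ifs with h1 h2 h3
    · rw [ih, mapHead_mapHead]
      congr 1
      cases specSplit rest (depth + 1) <;> simp [mapHead]
    · rw [ih, mapHead_mapHead]
      congr 1
      cases specSplit rest (depth - 1) <;> simp [mapHead]
    · rw [ih]
      cases h : specSplit rest depth <;> simp [mapHead]
    · rw [ih, mapHead_mapHead]
      congr 1
      cases specSplit rest depth <;> simp [mapHead]

-- every cut index produced from counter i is ≥ i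
theorem cutIdxs_ge (chars : List Char) (depth : Int) (i : Nat) :
    ∀ j ∈ cutIdxsB chars depth i, i ≤ j := by
  induction chars generalizing depth i with
  | nil => simp [cutIdxsB]
  | cons c rest ih =>
    intro j hj
    simp only [cutIdxsB] at hj
    split_ifs at hj with h1 h2 h3
    · exact le_trans (Nat.le_succ i) (ih _ _ _ hj)
    · exact le_trans (Nat.le_succ i) (ih _ _ _ hj)
    · rcases List.mem_cons.mp hj with rfl | hj
      · exact le_refl j
      · exact le_trans (Nat.le_succ i) (ih _ _ _ hj)
    · exact le_trans (Nat.le_succ i) (ih _ _ _ hj)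

-- shifting the start of buildSlices one char to the left prepends that char to the head cell
theorem buildSlices_cons (full : List Char) (i : Nat) (c : Char) (cuts : List Nat)
    (hdrop : full.drop i = c :: full.drop (i + 1)) (hge : ∀ j ∈ cuts, i + 1 ≤ j) :
    buildSlicesB full i cuts = mapHead (c :: ·) (buildSlicesB full (i + 1) cuts) := by
  cases cuts with
  | nil => simp [buildSlicesB, mapHead, hdrop]
  | cons j cs =>
    have hij : i + 1 ≤ j := hge j (List.mem_cons_self ..)
    simp only [buildSlicesB, mapHead]
    congr 1
    rw [hdrop]
    have : j - i = (j - (i + 1)) + 1 := by omega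
    rw [this, List.take_succ_cons]

-- B side: slices over the recorded cut indices equal the recursive spec
theorem buildSlices_cutIdxs_eq_spec (chars : List Char) (depth : Int) (full : List Char) (i : Nat)
    (hdrop : full.drop i = chars) :
    buildSlicesB full i (cutIdxsB chars depth i) = specSplit chars depth := by
  induction chars generalizing depth i with
  | nil => simp [cutIdxsB, buildSlicesB, specSplit, hdrop]
  | cons c rest ih =>
    have hdrop1 : full.drop (i + 1) = rest := by
      have : full.drop (i + 1) = (full.drop i).drop 1 := by
        rw [List.drop_drop]
      rw [this, hdrop]; rfl
    have hdc : full.drop i = c :: full.drop (i + 1) := by rw [hdrop, hdrop1]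
    simp only [cutIdxsB, specSplit]
    split_ifs with h1 h2 h3
    · rw [buildSlices_cons full i c _ hdc (cutIdxs_ge rest (depth + 1) (i + 1)),
        ih (depth + 1) (i + 1) hdrop1]
    · rw [buildSlices_cons full i c _ hdc (cutIdxs_ge rest (depth - 1) (i + 1)),
        ih (depth - 1) (i + 1) hdrop1]
    · simp only [buildSlicesB, Nat.sub_self, List.take_zero]
      rw [ih depth (i + 1) hdrop1]
    · rw [buildSlices_cons full i c _ hdc (cutIdxs_ge rest depth (i + 1)),
        ih depth (i + 1) hdrop1]

-- ===== VERDICT (by name: the statement is the Claim_ definition above) =====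
theorem split_cells_py_spec : Claim_equal_split_cells_py := by
  intro row_text _
  unfold Spec_split_cells_py split_cells_py split_cells_py_alt
  rw [loopA_eq_spec, buildSlices_cutIdxs_eq_spec row_text.toList 0 row_text.toList 0 rfl]
  congr 1
  cases specSplit row_text.toList 0 <;> simp [mapHead]
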